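-- pv_equiv track=rewrite | github.com/CKMaxwell/online-program-challenge | Python/Edabit/4_Hard/Words_With_Duplicate_Letters.py | no_duplicate_letters
-- ===== SOURCE A (Python) =====
-- def no_duplicate_letters(phrase):
--     phrase = phrase.lower()
--     word = map(list, phrase.split( ))
--     for i in word:
--         word_set = set(i)
--         word_list = list(i)
--         if len(word_set) == len(word_list):
--             continue
--         else:
--             return False
--             break
--     return True
-- ===== SOURCE B (Python) =====
-- def no_duplicate_letters(phrase):
--     for word in phrase.lower().split():
--         s = sorted(word)
--         for x, y in zip(s, s[1:]):
--             if x == y: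
--                 return False
--     return True
-- ===== Notes on version B (the rewrite author's own statement) =====
-- stated objective: alternative
-- what changed: Replaces the per-word set-construction-and-cardinality comparison with sorting each word's letters and scanning adjacent pairs for an equal neighbour.
import Mathlib
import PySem

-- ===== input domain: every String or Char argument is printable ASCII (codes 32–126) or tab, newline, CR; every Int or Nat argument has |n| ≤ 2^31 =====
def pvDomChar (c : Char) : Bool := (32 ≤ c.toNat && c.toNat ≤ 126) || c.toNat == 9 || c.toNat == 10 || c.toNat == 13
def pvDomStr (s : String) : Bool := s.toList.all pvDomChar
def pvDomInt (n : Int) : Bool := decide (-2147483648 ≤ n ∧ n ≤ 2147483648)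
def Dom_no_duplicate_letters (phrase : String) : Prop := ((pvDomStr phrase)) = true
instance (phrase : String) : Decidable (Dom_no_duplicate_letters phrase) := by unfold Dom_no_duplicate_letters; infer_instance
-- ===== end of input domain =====

-- B sorts each word's letters and scans adjacent pairs instead of A's set-cardinality test; same return value everywhere.
-- ===== PORT A =====
-- 'for i in word: if len(set(i)) == len(list(i)): continue else: return False' then 'return True'
def pvALoop : List (List Char) → Bool
  | [] => true
  | i :: rest =>
    if (PySem.Set.ofList i).length = i.length then pvALoop rest else false

def no_duplicate_letters (phrase : String) : Bool :=
  pvALoop (PySem.Chars.split₀ (PySem.Chars.lower phrase.toList))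

-- ===== PORT B =====
-- 's = sorted(word); for x, y in zip(s, s[1:]): if x == y: return False' then 'return True'
def pvBLoop : List (List Char) → Bool
  | [] => true
  | w :: rest =>
    let s := PySem.List.sorted w (fun c => c) false
    if (s.zip s.tail).any (fun p => p.1 == p.2) then false else pvBLoop rest

def no_duplicate_letters_alt (phrase : String) : Bool :=
  pvBLoop (PySem.Chars.split₀ (PySem.Chars.lower phrase.toList))

-- ===== PRECONDITION & SPEC =====
def Spec_no_duplicate_letters (phrase : String) (out : Bool) : Prop := out = no_duplicate_letters_alt phrase
instance (phrase : String) (out : Bool) : Decidable (Spec_no_duplicate_letters phrase out) := by unfold Spec_no_duplicate_letters; infer_instance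

-- ===== CLAIM (what is proved, stated in full; the proofs are below) =====
def Claim_equal_no_duplicate_letters : Prop := ∀ (phrase : String), Dom_no_duplicate_letters phrase → Spec_no_duplicate_letters phrase (no_duplicate_letters phrase)

-- ===== LEMMAS AND PROOFS =====

-- ===== VERDICT (by name: the statement is the Claim_ definition above) =====
-- A's per-word test: len(set(w)) == len(w) iff w has no duplicate letter.
lemma pv_ofList_len_iff (xs : List Char) :
    (PySem.Set.ofList xs).length = xs.length ↔ xs.Nodup := by
  constructor
  · intro h
    have hperm : (PySem.Set.ofList xs).Perm xs.dedup :=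
      List.perm_of_nodup_nodup_toFinset_eq (PySem.Set.nodup_ofList xs)
        (List.nodup_dedup xs)
        (by ext y; simp [PySem.Set.mem_ofList, List.mem_dedup])
    have hlen : xs.dedup.length = xs.length := by
      have := hperm.length_eq; omega
    exact List.dedup_eq_self.mp ((List.dedup_sublist xs).eq_of_length hlen)
  · intro h
    rw [PySem.Set.ofList_eq_self_of_nodup xs h]

-- B's per-word test on an (≤)-pairwise list: no equal adjacent pair iff no duplicate at all.
lemma pv_adj_iff (s : List Char) (hs : s.Pairwise (· ≤ ·)) :
    ((s.zip s.tail).any (fun p => p.1 == p.2) = false) ↔ s.Nodup := by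
  induction s with
  | nil => simp
  | cons a t ih =>
    cases t with
    | nil => simp
    | cons b u =>
      have hab : a ≤ b := (List.pairwise_cons.mp hs).1 b (by simp)
      have htail : (b :: u).Pairwise (· ≤ ·) := (List.pairwise_cons.mp hs).2
      by_cases hba : a = b
      · subst hba
        simp
      · have hlt : a < b := lt_of_le_of_ne hab hba
        have hnotmem : a ∉ b :: u := by
          intro hmem
          rcases List.mem_cons.mp hmem with h | h
          · exact hba h
          · have : b ≤ a := (List.pairwise_cons.mp htail).1 a h
            exact absurd (lt_of_lt_of_le hlt this) (lt_irrefl a)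
        have := ih htail
        simp only [List.tail_cons, List.zip_cons_cons, List.any_cons] at this ⊢
        simp [hba, hnotmem, this]

lemma pv_loops_eq (ws : List (List Char)) : pvALoop ws = pvBLoop ws := by
  induction ws with
  | nil => rfl
  | cons w rest ih =>
    have hsorted : (PySem.List.sorted w (fun c => c) false).Pairwise (· ≤ ·) :=
      PySem.List.sorted_pairwise w (fun c => c)
    have hnodup : (PySem.List.sorted w (fun c => c) false).Nodup ↔ w.Nodup :=
      (PySem.List.sorted_perm w (fun c => c) false).nodup_iff
    simp only [pvALoop, pvBLoop]
    by_cases hA : (PySem.Set.ofList w).length = w.length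
    · have : w.Nodup := (pv_ofList_len_iff w).mp hA
      have hB := (pv_adj_iff _ hsorted).mpr (hnodup.mpr this)
      simp [hA, hB, ih]
    · have hw : ¬ w.Nodup := fun hn => hA ((pv_ofList_len_iff w).mpr hn)
      have hB : ((PySem.List.sorted w (fun c => c) false).zip
          (PySem.List.sorted w (fun c => c) false).tail).any (fun p => p.1 == p.2) = true := by
        by_contra h
        exact hw (hnodup.mp ((pv_adj_iff _ hsorted).mp (Bool.eq_false_iff.mpr h)))
      simp [hA, hB]

-- ===== VERDICT (by name: the statement is the Claim_ definition above) =====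
theorem no_duplicate_letters_spec : Claim_equal_no_duplicate_letters := by
  intro phrase _
  unfold Spec_no_duplicate_letters no_duplicate_letters no_duplicate_letters_alt
  exact pv_loops_eq _
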